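-- pv_equiv track=rewrite | github.com/SamicChakir/LeetCode-Top-Interview-Questions---Python | Medium Difficulty/ArraysAndStrings/3sum.py | getElementsfromIndexIndict
-- ===== SOURCE A (Python) =====
-- def getElementsfromIndexIndict(nums):
--     dictio = dict()
--     size = len(nums)
--     for i in range(size):
--         for j in range(i+1):
--             if j in dictio:
--                 dictio[j].add(nums[i])
--             else:
--                 dictio[j] = {nums[i]}
--
--     return dictio
-- ===== SOURCE B (Python) =====
-- def getElementsfromIndexIndict(nums):
--     # Build the suffix sets in one backward pass: set for index j = {nums[j]} | set for j+1.
--     suffix = []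
--     acc = set()
--     for x in reversed(nums):
--         acc = {x} | acc
--         suffix.append(acc)
--     suffix.reverse()
--     return dict(enumerate(suffix))
-- ===== Notes on version B (the rewrite author's own statement) =====
-- stated objective: faster
-- what changed: Replaces the nested forward loops that insert nums[i] into every key j <= i with a single backward pass deriving each suffix set from the next one ({nums[j]} | next) and enumerating the resulting list.
import Mathlib
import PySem

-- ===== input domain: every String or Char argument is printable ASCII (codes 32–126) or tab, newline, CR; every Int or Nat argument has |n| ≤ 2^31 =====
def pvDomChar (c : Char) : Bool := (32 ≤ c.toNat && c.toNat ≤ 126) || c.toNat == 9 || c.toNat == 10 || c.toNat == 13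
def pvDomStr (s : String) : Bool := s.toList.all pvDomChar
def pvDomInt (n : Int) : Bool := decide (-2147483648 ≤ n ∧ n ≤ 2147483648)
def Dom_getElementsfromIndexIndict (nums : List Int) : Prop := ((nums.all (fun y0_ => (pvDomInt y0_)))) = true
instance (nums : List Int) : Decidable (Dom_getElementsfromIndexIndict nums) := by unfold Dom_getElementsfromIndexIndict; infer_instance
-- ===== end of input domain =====

-- B builds each key's suffix set from the next key's set in one backward pass instead of A's
-- nested forward insertion loops; both return the dict j ↦ set(nums[j:]).

-- ===== PORT A =====
def pvStepA (v : Int) (d : PySem.Dict Int (List Int)) (j : Int) : PySem.Dict Int (List Int) :=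
  if d.contains j then d.modify j [] (fun s => PySem.Set.add s v)
  else d.insert j (PySem.Set.ofList [v])

def getElementsfromIndexIndict (nums : List Int) : List (Int × List Int) :=
  ((PySem.List.pyRange 0 (nums.length : Int) 1).foldl
    (fun d i => (PySem.List.pyRange 0 (i+1) 1).foldl
      (fun d j => pvStepA (PySem.List.pyGetD nums i 0) d j) d)
    PySem.Dict.empty).items

-- ===== PORT B =====
-- the backward loop building the suffix-set list (acc = {x} | acc), as structural recursion
def pvSuffixSets : List Int → List (List Int)
  | [] => []
  | x :: rest =>
    let s := pvSuffixSets rest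
    PySem.Set.union (PySem.Set.ofList [x]) (s.headD PySem.Set.empty) :: s

def getElementsfromIndexIndict_alt (nums : List Int) : List (Int × List Int) :=
  PySem.List.enumerate (pvSuffixSets nums) 0

-- ===== PRECONDITION & SPEC =====
def Spec_getElementsfromIndexIndict (nums : List Int) (out : List (Int × List Int)) : Prop := out = getElementsfromIndexIndict_alt nums
instance (nums : List Int) (out : List (Int × List Int)) : Decidable (Spec_getElementsfromIndexIndict nums out) := by unfold Spec_getElementsfromIndexIndict; infer_instance

-- ===== CLAIM (what is proved, stated in full; the proofs are below) =====
def Claim_equal_getElementsfromIndexIndict : Prop := ∀ (nums : List Int), Dom_getElementsfromIndexIndict nums → Spec_getElementsfromIndexIndict nums (getElementsfromIndexIndict nums)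

-- ===== LEMMAS AND PROOFS =====

-- B side: {x} | set(l) = set(x :: l)
theorem pv_set_cons_union (x : Int) (l : List Int) :
    PySem.Set.union (PySem.Set.ofList [x]) (PySem.Set.ofList l) = PySem.Set.ofList (x :: l) := by
  simp [PySem.Set.union, PySem.Set.update_eq_append_filter, PySem.Set.ofList_cons,
    PySem.Set.ofList_ofList, PySem.Set.discard, PySem.Set.contains]
  rfl

theorem pv_suffixSets_eq (nums : List Int) :
    pvSuffixSets nums = (List.range nums.length).map (fun j => PySem.Set.ofList (nums.drop j)) := by
  induction nums with
  | nil => simp [pvSuffixSets]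
  | cons x rest ih =>
    rw [pvSuffixSets, ih]
    rw [List.length_cons, List.range_succ_eq_map]
    simp only [List.map_cons, List.map_map, Function.comp_def, List.drop_zero, Nat.succ_eq_add_one,
      List.drop_succ_cons]
    congr 1
    cases rest with
    | nil => simp [PySem.Set.union, PySem.Set.update, PySem.Set.empty]
    | cons y t =>
      simp only [List.length_cons, List.range_succ_eq_map, List.map_cons, List.headD_cons, List.drop_zero]
      exact pv_set_cons_union x (y :: t)

theorem pv_enum_map_range {α : Type} (n : Nat) (s : Int) (f : Nat → α) :
    PySem.List.enumerate ((List.range n).map f) s = (List.range n).map (fun (j : Nat) => (s + (j : Int), f j)) := by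
  induction n generalizing s f with
  | zero => simp
  | succ n ih =>
    rw [List.range_succ_eq_map]
    simp only [List.map_cons, List.map_map, PySem.List.enumerate_cons, Function.comp_def]
    rw [ih (s+1) (fun j => f (j+1))]
    simp only [Nat.succ_eq_add_one, Nat.cast_zero, add_zero, List.cons.injEq, true_and]
    apply List.map_congr_left; intro a _
    have : s + 1 + (a : Int) = s + ((a : Nat) + 1 : Nat) := by push_cast; ring
    rw [this]

theorem pv_alt_eq (nums : List Int) :
    getElementsfromIndexIndict_alt nums
      = (List.range nums.length).map (fun (j : Nat) => ((j : Int), PySem.Set.ofList (nums.drop j))) := by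
  rw [getElementsfromIndexIndict_alt, pv_suffixSets_eq, pv_enum_map_range]
  simp

-- A side: one pass of the inner loop over keys a..m, dict already holding keys 0..m-1
theorem pv_inner_loop (v m : Int) (hm : 0 ≤ m) :
    ∀ (k : Nat) (a : Int) (d : PySem.Dict Int (List Int)), 0 ≤ a → m + 1 - a = (k : Int) →
    (∀ j, d.contains j = decide (0 ≤ j ∧ j < m)) →
    ((PySem.List.pyRange a (m+1) 1).foldl (fun d j => pvStepA v d j) d).keys
        = d.keys ++ (if a ≤ m then [m] else [])
    ∧ ∀ j, ((PySem.List.pyRange a (m+1) 1).foldl (fun d j => pvStepA v d j) d).getD j []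
        = if a ≤ j ∧ j < m then PySem.Set.add (d.getD j []) v
          else if j = m ∧ a ≤ m then PySem.Set.ofList [v] else d.getD j [] := by
  intro k
  induction k with
  | zero =>
    intro a d ha hk hc
    have hae : a = m + 1 := by omega
    rw [hae, PySem.List.pyRange_one_eq_nil (le_refl _)]
    simp only [List.foldl_nil]
    constructor
    · rw [if_neg (by omega)]; simp
    · intro j
      rw [if_neg (by omega), if_neg (by omega)]
  | succ k ih =>
    intro a d ha hk hc
    have hab : a < m + 1 := by omega
    rw [PySem.List.pyRange_one_cons hab]
    simp only [List.foldl_cons]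
    by_cases hcase : a = m
    · -- last key m: fresh insert, rest of the range is empty
      have hnc : d.contains a = false := by rw [hc]; simp; omega
      have hstep : pvStepA v d a = d.insert a (PySem.Set.ofList [v]) := by
        rw [pvStepA, hnc]; simp
      rw [hstep, PySem.List.pyRange_one_eq_nil (by omega)]
      simp only [List.foldl_nil]
      constructor
      · rw [if_pos (by omega), PySem.Dict.keys_insert_of_not_contains d _ hnc, hcase]
      · intro j
        rw [PySem.Dict.getD_insert]
        subst hcase
        split_ifs <;> first | rfl | omega
    · -- a < m: modify an existing key in place
      have hcon : d.contains a = true := by rw [hc]; simp; omega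
      have hstep : pvStepA v d a = d.modify a [] (fun s => PySem.Set.add s v) := by
        rw [pvStepA, hcon]; simp
      rw [hstep]
      set d' := d.modify a [] (fun s => PySem.Set.add s v) with hd'
      have hc' : ∀ j, d'.contains j = decide (0 ≤ j ∧ j < m) := by
        intro j
        rw [hd', PySem.Dict.contains_modify, hc]
        by_cases hj : j = a
        · subst hj; simp; omega
        · have : (j == a) = false := by simp [hj]
          rw [this]; simp
      have hkeys' : d'.keys = d.keys := by
        rw [hd', PySem.Dict.keys_modify, PySem.Dict.keys_insert_of_contains d _ hcon]
      obtain ⟨ihk, ihg⟩ := ih (a+1) d' (by omega) (by omega) hc'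
      constructor
      · rw [ihk, hkeys', if_pos (by omega), if_pos (by omega)]
      · intro j
        rw [ihg j]
        have hgd' : ∀ j, d'.getD j [] = if j = a then PySem.Set.add (d.getD j []) v else d.getD j [] := by
          intro j
          rw [hd', PySem.Dict.getD_modify]
          by_cases hj : j = a
          · subst hj; simp
          · rw [if_neg hj, if_neg hj]
        rw [hgd' j]
        split_ifs <;> first | rfl | omega

-- A side: state of the dict after the first i outer iterations
theorem pv_outer_loop (nums : List Int) :
    ∀ (i : Nat), i ≤ nums.length →
    ((PySem.List.pyRange 0 (i : Int) 1).foldl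
        (fun d i => (PySem.List.pyRange 0 (i+1) 1).foldl
          (fun d j => pvStepA (PySem.List.pyGetD nums i 0) d j) d)
        PySem.Dict.empty).keys = (List.range i).map Int.ofNat
    ∧ (∀ j : Int, ((PySem.List.pyRange 0 (i : Int) 1).foldl
        (fun d i => (PySem.List.pyRange 0 (i+1) 1).foldl
          (fun d j => pvStepA (PySem.List.pyGetD nums i 0) d j) d)
        PySem.Dict.empty).contains j = decide (0 ≤ j ∧ j < (i : Int)))
    ∧ ∀ j : Nat, j < i → ((PySem.List.pyRange 0 (i : Int) 1).foldl
        (fun d i => (PySem.List.pyRange 0 (i+1) 1).foldl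
          (fun d j => pvStepA (PySem.List.pyGetD nums i 0) d j) d)
        PySem.Dict.empty).getD (j : Int) []
        = PySem.Set.ofList ((nums.drop j).take (i - j)) := by
  intro i
  induction i with
  | zero =>
    intro _
    refine ⟨?_, ?_, ?_⟩
    · simp [PySem.List.pyRange_one_eq_nil]
    · intro j; simp [PySem.List.pyRange_one_eq_nil]
    · intro j hj; omega
  | succ i ih =>
    intro hle
    obtain ⟨ihk, ihc, ihg⟩ := ih (by omega)
    have hcast : ((i + 1 : Nat) : Int) = (i : Int) + 1 := by push_cast; ring
    rw [hcast, PySem.List.pyRange_one_succ_right (by positivity)]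
    rw [List.foldl_append]
    simp only [List.foldl_cons, List.foldl_nil]
    set D := (PySem.List.pyRange 0 (i : Int) 1).foldl
        (fun d i => (PySem.List.pyRange 0 (i+1) 1).foldl
          (fun d j => pvStepA (PySem.List.pyGetD nums i 0) d j) d)
        PySem.Dict.empty with hD
    obtain ⟨hk, hg⟩ := pv_inner_loop (PySem.List.pyGetD nums (i:Int) 0) (i : Int) (by positivity)
      (i+1) 0 D (le_refl 0) (by push_cast; ring) ihc
    have hvi : PySem.List.pyGetD nums (i:Int) 0 = nums.getD i 0 := by
      simp
    refine ⟨?_, ?_, ?_⟩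
    · rw [hk, ihk, if_pos (by positivity), List.range_succ, List.map_append]; rfl
    · intro j
      rw [PySem.Dict.contains_eq_decide_mem_keys, hk, ihk, if_pos (by positivity)]
      have hmem : (j ∈ (List.range i).map Int.ofNat ++ [(i:Int)]) ↔ (0 ≤ j ∧ j < (i : Int) + 1) := by
        simp only [List.mem_append, List.mem_map, List.mem_range, List.mem_singleton]
        constructor
        · rintro (⟨a, ha, rfl⟩ | rfl) <;> simp <;> omega
        · rintro ⟨h0, h1⟩
          by_cases hj : j = (i : Int)
          · right; exact hj
          · left; exact ⟨j.toNat, by omega, by simpa using Int.toNat_of_nonneg h0⟩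
      rw [decide_eq_decide.mpr hmem]
    · intro j hj
      rw [hg (j : Int)]
      have hjlen : (j:Nat) < nums.length := by omega
      have hilen : (i:Nat) < nums.length := by omega
      by_cases hji : j < i
      · rw [if_pos (by constructor <;> [positivity; exact_mod_cast hji])]
        rw [ihg j hji, hvi]
        have htake : (nums.drop j).take (i + 1 - j) = (nums.drop j).take (i - j) ++ [nums[i]] := by
          have h1 : i + 1 - j = (i - j) + 1 := by omega
          rw [h1, List.take_add_one]
          have h2 : (nums.drop j)[i - j]? = some nums[i] := by
            rw [List.getElem?_drop]
            rw [List.getElem?_eq_getElem (by omega)]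
            congr 1
            congr 1
            omega
          rw [h2]
          rfl
        rw [htake, PySem.Set.ofList_append_singleton]
        congr 1
        rw [List.getD_eq_getElem nums 0 hilen]
      · have hjeq : j = i := by omega
        subst hjeq
        rw [if_neg (by omega), if_pos (by constructor <;> [rfl; positivity]), hvi]
        have : (nums.drop j).take (j + 1 - j) = [nums[j]] := by
          have h1 : j + 1 - j = 1 := by omega
          rw [h1]
          rw [List.drop_eq_getElem_cons hjlen]
          rfl
        rw [this, List.getD_eq_getElem nums 0 hjlen]

-- keys are the distinct integers 0..n-1
theorem pv_nodup_cast_range (n : Nat) : ((List.range n).map Int.ofNat).Nodup :=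
  (List.nodup_range).map (fun a b h => Int.ofNat.inj h)

-- ===== VERDICT (by name: the statement is the Claim_ definition above) =====
theorem getElementsfromIndexIndict_spec : Claim_equal_getElementsfromIndexIndict := by
  unfold Claim_equal_getElementsfromIndexIndict
  intro nums _
  unfold Spec_getElementsfromIndexIndict
  rw [pv_alt_eq, getElementsfromIndexIndict]
  obtain ⟨hk, _, hg⟩ := pv_outer_loop nums nums.length (le_refl _)
  rw [PySem.Dict.items_eq_map_keys _ (by rw [hk]; exact pv_nodup_cast_range _) []]
  rw [hk, List.map_map]
  apply List.map_congr_left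
  intro j hj
  rw [List.mem_range] at hj
  simp only [Function.comp_def]
  have := hg j hj
  rw [Int.ofNat_eq_natCast, this]
  have : (nums.drop j).take (nums.length - j) = nums.drop j := by
    apply List.take_of_length_le
    rw [List.length_drop]
  rw [this]
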